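-- pv_equiv track=rewrite | github.com/DCXII/CryptSwissKnife | csk/engine.py | adfgvx_cipher
-- ===== SOURCE A (Python) =====
-- import math
--
-- def adfgvx_cipher(text: str, key: str, matrix: str, decrypt: bool = False) -> str:
--     """ADFGVX cipher"""
--     polybius_square = {}
--     reverse_polybius_square = {}
--     coords = ['A', 'D', 'F', 'G', 'V', 'X']
--
--     if len(matrix) != 36 or len(set(matrix)) != 36:
--         return "ERROR: Polybius matrix must be 36 unique characters (A-Z, 0-9)."
--
--     k = 0
--     for r in coords:
--         for c in coords:
--             polybius_square[matrix[k].upper()] = r + c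
--             reverse_polybius_square[r + c] = matrix[k].upper()
--             k += 1
--
--     text = "".join(filter(str.isalnum, text)).upper().replace('J', 'I')
--
--     if not decrypt:
--         substituted_text = ""
--         for char in text:
--             if char in polybius_square:
--                 substituted_text += polybius_square[char]
--             else:
--                 return f"ERROR: Character '{char}' not in Polybius square (A-Z, 0-9)."
--
--         key_order = sorted(range(len(key)), key=lambda k_idx: key[k_idx])
--         num_cols = len(key)
--         num_rows = math.ceil(len(substituted_text) / num_cols)
--
--         grid = [['' for _ in range(num_cols)] for _ in range(num_rows)]
--
--         k = 0
--         for r in range(num_rows):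
--             for c in range(num_cols):
--                 if k < len(substituted_text):
--                     grid[r][c] = substituted_text[k]
--                     k += 1
--
--         cipher_text = ""
--         for col_idx in key_order:
--             for r in range(num_rows):
--                 cipher_text += grid[r][col_idx]
--         return cipher_text
--     else:
--         num_cols = len(key)
--         num_rows = math.ceil(len(text) / num_cols)
--
--         grid = [['' for _ in range(num_cols)] for _ in range(num_rows)]
--
--         key_order = sorted(range(len(key)), key=lambda k_idx: key[k_idx])
--
--         text_idx = 0
--         for original_col_idx in key_order:
--             for r in range(num_rows):
--                 if text_idx < len(text):
--                     grid[r][original_col_idx] = text[text_idx]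
--                     text_idx += 1
--
--         transposed_text = ""
--         for r in range(num_rows):
--             for c in range(num_cols):
--                 transposed_text += grid[r][c]
--
--         decrypted_text = ""
--         for i in range(0, len(transposed_text), 2):
--             pair = transposed_text[i:i+2]
--             if pair in reverse_polybius_square:
--                 decrypted_text += reverse_polybius_square[pair]
--             else:
--                 return f"ERROR: Invalid pair '{pair}' in ciphertext for reverse substitution."
--         return decrypted_text
-- ===== SOURCE B (Python) =====
-- def adfgvx_cipher(text: str, key: str, matrix: str, decrypt: bool = False) -> str:
--     """ADFGVX cipher, grid-free: pure index arithmetic instead of a 2D grid."""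
--     coords = "ADFGVX"
--     if len(matrix) != 36 or len(set(matrix)) != 36:
--         return "ERROR: Polybius matrix must be 36 unique characters (A-Z, 0-9)."
--
--     pairs = [coords[i // 6] + coords[i % 6] for i in range(36)]
--     polybius = {matrix[i].upper(): pairs[i] for i in range(36)}
--     reverse = {pairs[i]: matrix[i].upper() for i in range(36)}
--
--     text = "".join(ch for ch in text if ch.isalnum()).upper().replace('J', 'I')
--     num_cols = len(key)
--     key_order = sorted(range(num_cols), key=key.__getitem__)
--
--     if not decrypt:
--         bad = next((ch for ch in text if ch not in polybius), None)
--         if bad is not None: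
--             return f"ERROR: Character '{bad}' not in Polybius square (A-Z, 0-9)."
--         s = "".join(polybius[ch] for ch in text)
--         # column c of the row-major grid is exactly s[c], s[c+num_cols], ...
--         return "".join(s[i] for c in key_order for i in range(c, len(s), num_cols))
--     else:
--         num_rows = -(-len(text) // num_cols)
--         cols = [''] * num_cols
--         for i, p in enumerate(key_order):
--             cols[p] = text[i * num_rows:(i + 1) * num_rows]
--         transposed = "".join(cols[c][r] for r in range(num_rows)
--                              for c in range(num_cols) if r < len(cols[c]))
--         chunks = [transposed[i:i + 2] for i in range(0, len(transposed), 2)]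
--         bad = next((p for p in chunks if p not in reverse), None)
--         if bad is not None:
--             return f"ERROR: Invalid pair '{bad}' in ciphertext for reverse substitution."
--         return "".join(reverse[p] for p in chunks)
-- ===== Notes on version B (the rewrite author's own statement) =====
-- stated objective: simpler
-- what changed: B drops A's mutable 2D grid entirely: encryption reads the substituted text by index arithmetic (one strided range per key column), decryption assigns each sorted-key column a contiguous slice of the ciphertext and rebuilds the row-major text from those slices; the Polybius tables are built by comprehensions over range(36) instead of nested loops with a counter.
import Mathlib
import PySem

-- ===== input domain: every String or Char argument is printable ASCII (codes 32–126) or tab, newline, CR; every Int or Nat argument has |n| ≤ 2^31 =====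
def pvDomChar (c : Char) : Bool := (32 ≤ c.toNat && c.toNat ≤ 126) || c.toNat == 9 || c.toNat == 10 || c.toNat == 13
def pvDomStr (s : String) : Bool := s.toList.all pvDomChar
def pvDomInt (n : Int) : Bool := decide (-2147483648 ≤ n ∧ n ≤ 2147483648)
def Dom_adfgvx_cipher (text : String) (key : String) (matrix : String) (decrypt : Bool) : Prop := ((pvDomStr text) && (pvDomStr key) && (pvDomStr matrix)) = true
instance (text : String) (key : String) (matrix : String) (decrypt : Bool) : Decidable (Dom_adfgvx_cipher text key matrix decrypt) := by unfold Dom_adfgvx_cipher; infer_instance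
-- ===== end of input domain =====

-- ADFGVX cipher: B replaces A's mutable 2D transposition grid by pure index
-- arithmetic (strided reads for encryption, contiguous column slices for
-- decryption); objective: simpler. Equivalence proved on Pre_ (A raises
-- ZeroDivisionError outside it).


-- ===== PORT A =====
def pvCoords : List Char := ['A', 'D', 'F', 'G', 'V', 'X']

def pvSet2 (g : List (List (List Char))) (r c : Nat) (v : List Char) : List (List (List Char)) :=
  g.set r ((g.getD r []).set c v)

def pvCell (g : List (List (List Char))) (r c : Nat) : List Char :=
  (g.getD r []).getD c []

-- the two nested 'for r in coords: for c in coords' loops with counter k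
-- (matrix[k].upper() is upperChar on the ASCII domain)
def pvBuildA (m : List Char) :
    PySem.Dict Char (List Char) × PySem.Dict (List Char) Char × Nat :=
  pvCoords.foldl (fun st r =>
    pvCoords.foldl
      (fun (st : PySem.Dict Char (List Char) × PySem.Dict (List Char) Char × Nat) c =>
        (st.1.insert (PySem.Chars.upperChar (m.getD st.2.2 ' ')) [r, c],
         st.2.1.insert [r, c] (PySem.Chars.upperChar (m.getD st.2.2 ' ')),
         st.2.2 + 1)) st)
    (PySem.Dict.empty, PySem.Dict.empty, 0)

-- "".join(filter(str.isalnum, text)).upper().replace('J', 'I')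
def pvPrepA (text : List Char) : List Char :=
  PySem.Chars.replace (PySem.Chars.upper (text.filter PySem.Chars.isalnum)) ['J'] ['I']

def pvErrCharA (ch : Char) : List Char :=
  "ERROR: Character '".toList ++ [ch] ++ "' not in Polybius square (A-Z, 0-9).".toList

-- the substitution loop with its early error return
def pvSubstA (poly : PySem.Dict Char (List Char)) : List Char → Except (List Char) (List Char)
  | [] => .ok []
  | ch :: rest =>
    if poly.contains ch then
      match pvSubstA poly rest with
      | .ok s => .ok (poly.getD ch [] ++ s)
      | .error e => .error e
    else .error (pvErrCharA ch)

def pvErrPairA (p : List Char) : List Char :=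
  "ERROR: Invalid pair '".toList ++ p ++ "' in ciphertext for reverse substitution.".toList

-- 'for i in range(0, len, 2): pair = t[i:i+2]; …' with its early error return
def pvDecodeA (rev : PySem.Dict (List Char) Char) : List Char → Except (List Char) (List Char)
  | [] => .ok []
  | [a] =>
    if rev.contains [a] then .ok [rev.getD [a] ' '] else .error (pvErrPairA [a])
  | a :: b :: rest =>
    if rev.contains [a, b] then
      match pvDecodeA rev rest with
      | .ok s => .ok (rev.getD [a, b] ' ' :: s)
      | .error e => .error e
    else .error (pvErrPairA [a, b])

-- math.ceil(len/num_cols) is exact as -((-len) // num_cols) for these sizes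
def adfgvx_cipher (text : String) (key : String) (matrix : String) (decrypt : Bool) : String :=
  let m := matrix.toList
  if m.length ≠ 36 ∨ (PySem.Set.ofList m).length ≠ 36 then
    "ERROR: Polybius matrix must be 36 unique characters (A-Z, 0-9)."
  else
    let poly := (pvBuildA m).1
    let rev := (pvBuildA m).2.1
    let t := pvPrepA text.toList
    let keyL := key.toList
    if !decrypt then
      match pvSubstA poly t with
      | .error e => String.ofList e
      | .ok s =>
        let ko := PySem.List.sorted (PySem.List.pyRange 0 (keyL.length : Int) 1)
          (fun i => PySem.List.pyGetD keyL i ' ') false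
        let nc := keyL.length
        let nrI := -(PySem.Int.floordiv (-(s.length : Int)) (nc : Int))
        let fill := (PySem.List.pyRange 0 nrI 1).foldl (fun st r =>
            (PySem.List.pyRange 0 (nc : Int) 1).foldl
              (fun (st : List (List (List Char)) × Nat) c =>
                if st.2 < s.length then
                  (pvSet2 st.1 r.toNat c.toNat [s.getD st.2 ' '], st.2 + 1)
                else st) st)
          (List.replicate nrI.toNat (List.replicate nc ([] : List Char)), 0)
        let ct := ko.foldl (fun acc col =>
            (PySem.List.pyRange 0 nrI 1).foldl
              (fun acc r => acc ++ pvCell fill.1 r.toNat col.toNat) acc) []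
        String.ofList ct
    else
      let nc := keyL.length
      let nrI := -(PySem.Int.floordiv (-(t.length : Int)) (nc : Int))
      let ko := PySem.List.sorted (PySem.List.pyRange 0 (nc : Int) 1)
        (fun i => PySem.List.pyGetD keyL i ' ') false
      let fill := ko.foldl (fun st col =>
          (PySem.List.pyRange 0 nrI 1).foldl
            (fun (st : List (List (List Char)) × Nat) r =>
              if st.2 < t.length then
                (pvSet2 st.1 r.toNat col.toNat [t.getD st.2 ' '], st.2 + 1)
              else st) st)
        (List.replicate nrI.toNat (List.replicate nc ([] : List Char)), 0)
      let tr := (PySem.List.pyRange 0 nrI 1).foldl (fun acc r =>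
          (PySem.List.pyRange 0 (nc : Int) 1).foldl
            (fun acc c => acc ++ pvCell fill.1 r.toNat c.toNat) acc) []
      match pvDecodeA rev tr with
      | .ok out => String.ofList out
      | .error e => String.ofList e

-- ===== PORT B =====
def pvCoordsB : List Char := "ADFGVX".toList

def pvPairsB : List (List Char) :=
  (List.range 36).map (fun i => [pvCoordsB.getD (i / 6) ' ', pvCoordsB.getD (i % 6) ' '])

def pvPolyB (m : List Char) : PySem.Dict Char (List Char) :=
  PySem.Dict.ofList ((List.range 36).map
    (fun i => (PySem.Chars.upperChar (m.getD i ' '), pvPairsB.getD i [])))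

def pvRevB (m : List Char) : PySem.Dict (List Char) Char :=
  PySem.Dict.ofList ((List.range 36).map
    (fun i => (pvPairsB.getD i [], PySem.Chars.upperChar (m.getD i ' '))))

-- [transposed[i:i+2] for i in range(0, len(transposed), 2)]
def pvChunk2B : List Char → List (List Char)
  | [] => []
  | [a] => [[a]]
  | a :: b :: rest => [a, b] :: pvChunk2B rest

def adfgvx_cipher_alt (text : String) (key : String) (matrix : String) (decrypt : Bool) : String :=
  let m := matrix.toList
  if m.length ≠ 36 ∨ (PySem.Set.ofList m).length ≠ 36 then
    "ERROR: Polybius matrix must be 36 unique characters (A-Z, 0-9)."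
  else
    let poly := pvPolyB m
    let rev := pvRevB m
    let t := pvPrepA text.toList
    let nc := key.toList.length
    let ko := PySem.List.sorted (PySem.List.pyRange 0 (nc : Int) 1)
      (fun i => PySem.List.pyGetD key.toList i ' ') false
    if !decrypt then
      match t.find? (fun ch => !poly.contains ch) with
      | some ch => String.ofList (pvErrCharA ch)
      | none =>
        let s := t.flatMap (fun ch => poly.getD ch [])
        String.ofList (ko.flatMap (fun c =>
          (PySem.List.pyRange c (s.length : Int) (nc : Int)).map
            (fun i => PySem.List.pyGetD s i ' ')))
    else
      let nrI := -(PySem.Int.floordiv (-(t.length : Int)) (nc : Int))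
      let cols := (PySem.List.enumerate ko 0).foldl
        (fun cols p =>
          cols.set p.2.toNat (PySem.List.slice t (some (p.1 * nrI)) (some ((p.1 + 1) * nrI))))
        (List.replicate nc ([] : List Char))
      let tr := (List.range nrI.toNat).flatMap (fun r =>
        (List.range nc).flatMap (fun c =>
          if r < (cols.getD c []).length then [(cols.getD c []).getD r ' '] else []))
      let chunks := pvChunk2B tr
      match chunks.find? (fun p => !rev.contains p) with
      | some p => String.ofList (pvErrPairA p)
      | none => String.ofList (chunks.map (fun p => rev.getD p ' '))

-- ===== PRECONDITION & SPEC =====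
-- Pre_ excludes exactly the inputs on which Python A raises ZeroDivisionError:
-- an empty key together with a valid 36-character matrix, unless encryption
-- already returned its character error before reaching the division (i.e. some
-- preprocessed character is outside the square).
def Pre_adfgvx_cipher (text : String) (key : String) (matrix : String) (decrypt : Bool) : Prop :=
  (matrix.toList.length = 36 ∧ (PySem.Set.ofList matrix.toList).length = 36 ∧ key = "") →
    (decrypt = false ∧ ∃ ch ∈ pvPrepA text.toList, ∀ c ∈ matrix.toList, PySem.Chars.upperChar c ≠ ch)
instance (text : String) (key : String) (matrix : String) (decrypt : Bool) : Decidable (Pre_adfgvx_cipher text key matrix decrypt) := by unfold Pre_adfgvx_cipher; infer_instance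

def pvWitness_adfgvx_cipher : String × String × String × Bool :=
  ("ATTACK AT DAWN", "KEY", "ABCDEFGHIKLMNOPQRSTUVWXYZ0123456789J", false)

def Spec_adfgvx_cipher (text : String) (key : String) (matrix : String) (decrypt : Bool) (out : String) : Prop := out = adfgvx_cipher_alt text key matrix decrypt
instance (text : String) (key : String) (matrix : String) (decrypt : Bool) (out : String) : Decidable (Spec_adfgvx_cipher text key matrix decrypt out) := by unfold Spec_adfgvx_cipher; infer_instance

-- ===== CLAIM (what is proved, stated in full; the proofs are below) =====
def Claim_equal_adfgvx_cipher : Prop := ∀ (text : String) (key : String) (matrix : String) (decrypt : Bool), Dom_adfgvx_cipher text key matrix decrypt → Pre_adfgvx_cipher text key matrix decrypt → Spec_adfgvx_cipher text key matrix decrypt (adfgvx_cipher text key matrix decrypt)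

-- ===== LEMMAS AND PROOFS =====
-- ===== basic grid lemmas =====
theorem pvSet2_length (g : List (List (List Char))) (r c : Nat) (v : List Char) :
    (pvSet2 g r c v).length = g.length := by simp [pvSet2]

theorem pvSet2_getD_len (g : List (List (List Char))) (r c : Nat) (v : List Char) (r' : Nat) :
    ((pvSet2 g r c v).getD r' []).length = (g.getD r' []).length := by
  simp only [pvSet2, List.getD_eq_getElem?_getD, List.getElem?_set]
  by_cases h : r = r'
  · subst h
    by_cases hr : r < g.length
    · simp [hr, List.getD_eq_getElem?_getD]
    · simp [hr, List.getElem?_eq_none (by omega : g.length ≤ r)]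
  · simp [h]

theorem pvCell_set2_same (g : List (List (List Char))) (r c : Nat) (v : List Char)
    (hr : r < g.length) (hc : c < (g.getD r []).length) :
    pvCell (pvSet2 g r c v) r c = v := by
  simp only [pvCell, pvSet2, List.getD_eq_getElem?_getD, List.getElem?_set, if_pos rfl, hr,
    if_pos rfl]
  simp only [List.getD_eq_getElem?_getD] at hc ⊢
  simp [List.getElem?_set, hc]

theorem pvCell_set2_ne (g : List (List (List Char))) (r c : Nat) (v : List Char)
    (r' c' : Nat) (h : ¬(r = r' ∧ c = c')) :
    pvCell (pvSet2 g r c v) r' c' = pvCell g r' c' := by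
  simp only [pvCell, pvSet2, List.getD_eq_getElem?_getD, List.getElem?_set]
  by_cases hr : r = r'
  · subst hr
    have hc : ¬ c = c' := fun hc => h ⟨rfl, hc⟩
    by_cases hlen : r < g.length
    · simp [hlen, List.getD_eq_getElem?_getD, List.getElem?_set, hc]
    · simp [hlen]
  · simp [hr]

-- ===== the shared cell-filling step ('if k < len(text): grid[...] = text[k]; k += 1') =====
abbrev pvStep (s : List Char) (pos : Nat → Nat × Nat) (st : List (List (List Char)) × Nat)
    (x : Nat) : List (List (List Char)) × Nat :=
  if st.2 < s.length then (pvSet2 st.1 (pos x).1 (pos x).2 [s.getD st.2 ' '], st.2 + 1) else st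

theorem pvFill_length (s : List Char) (pos : Nat → Nat × Nat) (n : Nat)
    (g : List (List (List Char))) (k : Nat) :
    ((List.range n).foldl (pvStep s pos) (g, k)).1.length = g.length := by
  induction n generalizing g k with
  | zero => simp
  | succ n ih =>
    rw [List.range_succ, List.foldl_append]
    simp only [List.foldl_cons, List.foldl_nil, pvStep]
    split
    · rw [pvSet2_length]; exact ih g k
    · exact ih g k

theorem pvFill_getD_len (s : List Char) (pos : Nat → Nat × Nat) (n : Nat)
    (g : List (List (List Char))) (k : Nat) (r' : Nat) :
    (((List.range n).foldl (pvStep s pos) (g, k)).1.getD r' []).length = (g.getD r' []).length := by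
  induction n generalizing g k with
  | zero => simp
  | succ n ih =>
    rw [List.range_succ, List.foldl_append]
    simp only [List.foldl_cons, List.foldl_nil, pvStep]
    split
    · rw [pvSet2_getD_len]; exact ih g k
    · exact ih g k

theorem pvFill_counter (s : List Char) (pos : Nat → Nat × Nat) (n : Nat)
    (g : List (List (List Char))) (k : Nat) (hk : k ≤ s.length) :
    ((List.range n).foldl (pvStep s pos) (g, k)).2 = min (k + n) s.length := by
  induction n generalizing g k with
  | zero => simpa using (by omega : k = min (k + 0) s.length)
  | succ n ih =>
    rw [List.range_succ, List.foldl_append]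
    rcases hst : List.foldl (pvStep s pos) (g, k) (List.range n) with ⟨g', k'⟩
    have hk' : k' = min (k + n) s.length := by
      have := ih g k hk; rw [hst] at this; exact this
    simp only [List.foldl_cons, List.foldl_nil, pvStep]
    by_cases h : k' < s.length <;> simp [h] <;> omega

theorem pvFill_cell_miss (s : List Char) (pos : Nat → Nat × Nat) (n : Nat)
    (g : List (List (List Char))) (k : Nat) (r c : Nat)
    (h : ∀ x, x < n → pos x ≠ (r, c)) :
    pvCell ((List.range n).foldl (pvStep s pos) (g, k)).1 r c = pvCell g r c := by
  induction n generalizing g k with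
  | zero => simp
  | succ n ih =>
    rw [List.range_succ, List.foldl_append]
    simp only [List.foldl_cons, List.foldl_nil, pvStep]
    split
    · rw [pvCell_set2_ne]
      · exact ih g k (fun x hx => h x (by omega))
      · intro ⟨h1, h2⟩
        exact h n (by omega) (by rw [Prod.ext_iff]; exact ⟨h1, h2⟩)
    · exact ih g k (fun x hx => h x (by omega))

theorem pvFill_cell_hit (s : List Char) (pos : Nat → Nat × Nat) (n : Nat)
    (g : List (List (List Char))) (k : Nat) (x : Nat)
    (hinj : ∀ a b, pos a = pos b → a = b) (hx : x < n) (hk : k ≤ s.length)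
    (hr : (pos x).1 < g.length) (hc : (pos x).2 < (g.getD (pos x).1 []).length) :
    pvCell ((List.range n).foldl (pvStep s pos) (g, k)).1 (pos x).1 (pos x).2 =
      if k + x < s.length then [s.getD (k + x) ' '] else pvCell g (pos x).1 (pos x).2 := by
  induction n generalizing g k with
  | zero => omega
  | succ n ih =>
    rw [List.range_succ, List.foldl_append]
    simp only [List.foldl_cons, List.foldl_nil, pvStep]
    rcases Nat.lt_or_ge x n with hxn | hxn
    · split
      · rw [pvCell_set2_ne]
        · exact ih g k hxn hk hr hc
        · intro ⟨h1, h2⟩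
          have hnx : pos n = pos x := by rw [Prod.ext_iff]; exact ⟨h1, h2⟩
          have := hinj n x hnx
          omega
      · exact ih g k hxn hk hr hc
    · have hxeq : x = n := by omega
      subst hxeq
      have hcnt := pvFill_counter s pos x g k hk
      rw [hcnt]
      by_cases hfire : min (k + x) s.length < s.length
      · rw [if_pos hfire]
        have hkx : k + x < s.length := by omega
        rw [if_pos hkx]
        have hmin : min (k + x) s.length = k + x := by omega
        rw [hmin]
        exact pvCell_set2_same _ _ _ _
          (by rw [pvFill_length]; exact hr) (by rw [pvFill_getD_len]; exact hc)
      · rw [if_neg hfire, if_neg (by omega)]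
        refine pvFill_cell_miss s pos x g k _ _ (fun y hy hpy => ?_)
        have : y = x := hinj y x (by rw [hpy])
        omega
-- ===== outer fill loops: dimensions and counter =====
theorem pvFoldOuter_length (s : List Char) (m : Nat) (posf : Nat → Nat → Nat × Nat)
    (L : List Nat) (st : List (List (List Char)) × Nat) :
    (L.foldl (fun st e => (List.range m).foldl (pvStep s (posf e)) st) st).1.length = st.1.length := by
  induction L generalizing st with
  | nil => rfl
  | cons e L ih =>
    simp only [List.foldl_cons]
    rw [ih]
    rcases st with ⟨g, k⟩
    exact pvFill_length s (posf e) m g k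

theorem pvFoldOuter_getD_len (s : List Char) (m : Nat) (posf : Nat → Nat → Nat × Nat)
    (L : List Nat) (st : List (List (List Char)) × Nat) (r' : Nat) :
    ((L.foldl (fun st e => (List.range m).foldl (pvStep s (posf e)) st) st).1.getD r' []).length =
      (st.1.getD r' []).length := by
  induction L generalizing st with
  | nil => rfl
  | cons e L ih =>
    simp only [List.foldl_cons]
    rw [ih]
    rcases st with ⟨g, k⟩
    exact pvFill_getD_len s (posf e) m g k r'

theorem pvFoldOuter_counter (s : List Char) (m : Nat) (posf : Nat → Nat → Nat × Nat)
    (L : List Nat) (st : List (List (List Char)) × Nat) (hk : st.2 ≤ s.length) :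
    (L.foldl (fun st e => (List.range m).foldl (pvStep s (posf e)) st) st).2 =
      min (st.2 + L.length * m) s.length := by
  induction L generalizing st with
  | nil =>
    simp only [List.foldl_nil, List.length_nil, Nat.zero_mul, Nat.add_zero]
    omega
  | cons e L ih =>
    simp only [List.foldl_cons]
    rcases st with ⟨g, k⟩
    rcases hst : (List.range m).foldl (pvStep s (posf e)) (g, k) with ⟨g1, k1⟩
    have hk1 : k1 = min (k + m) s.length := by
      have := pvFill_counter s (posf e) m g k hk
      rw [hst] at this; exact this
    rw [ih ⟨g1, k1⟩ (by simp only [hk1]; omega)]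
    simp only [List.length_cons, Nat.succ_mul, hk1]
    omega

-- ===== encryption: cell (r,c) of the filled grid is s[r*nc+c] (row-major) =====
theorem pvEncCell (s : List Char) (nc R0 : Nat) (R : Nat) (hR : R ≤ R0)
    (r c : Nat) (hr : r < R0) (hc : c < nc) :
    pvCell ((List.range R).foldl
        (fun st e => (List.range nc).foldl (pvStep s (fun x => (e, x))) st)
        (List.replicate R0 (List.replicate nc ([] : List Char)), 0)).1 r c =
      if r < R ∧ r * nc + c < s.length then [s.getD (r * nc + c) ' '] else [] := by
  induction R with
  | zero =>
    simp only [List.range_zero, List.foldl_nil]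
    rw [if_neg (by omega)]
    simp [pvCell, List.getD_eq_getElem?_getD, List.getElem?_replicate, hr, hc]
  | succ R ih =>
    rw [List.range_succ, List.foldl_append]
    rcases hst : (List.range R).foldl
        (fun st e => (List.range nc).foldl (pvStep s (fun x => (e, x))) st)
        (List.replicate R0 (List.replicate nc ([] : List Char)), 0) with ⟨g', k'⟩
    have hlen : g'.length = R0 := by
      have := pvFoldOuter_length s nc (fun e x => (e, x)) (List.range R)
        (List.replicate R0 (List.replicate nc ([] : List Char)), 0)
      rw [hst] at this; simpa using this
    have hrowlen : ∀ r', r' < R0 → (g'.getD r' []).length = nc := by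
      intro r' hr'
      have := pvFoldOuter_getD_len s nc (fun e x => (e, x)) (List.range R)
        (List.replicate R0 (List.replicate nc ([] : List Char)), 0) r'
      rw [hst] at this
      simp only at this
      rw [this]
      simp [List.getD_eq_getElem?_getD, List.getElem?_replicate, hr']
    have hk' : k' = min (R * nc) s.length := by
      have := pvFoldOuter_counter s nc (fun e x => (e, x)) (List.range R)
        (List.replicate R0 (List.replicate nc ([] : List Char)), 0) (by simp)
      rw [hst] at this
      simpa using this
    have hg := ih (by omega)
    rw [hst] at hg
    simp only [List.foldl_cons, List.foldl_nil]
    by_cases hrR : r = R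
    · subst hrR
      have h := pvFill_cell_hit s (fun x => (r, x)) nc g' k' c
        (fun a b hab => by simpa using congrArg Prod.snd hab) hc (by omega)
        (Nat.lt_of_lt_of_eq hr hlen.symm)
        (Nat.lt_of_lt_of_eq hc (hrowlen r hr).symm)
      simp only at h
      have hg' : pvCell g' r c = [] := by
        rw [hg, if_neg (fun hcon => absurd hcon.1 (Nat.lt_irrefl r))]
      rw [h, hg']
      simp only [Nat.lt_succ_self, true_and]
      rcases Nat.lt_or_ge s.length (r * nc) with hlt | hle
      · rw [show k' = s.length from by omega]
        rw [if_neg (by omega),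
          if_neg (fun hcon => absurd hcon (Nat.not_lt.mpr
            (le_trans (Nat.le_of_lt hlt) (Nat.le_add_right _ c))))]
      · rw [show k' = r * nc from by omega]
    · rw [pvFill_cell_miss s (fun x => (R, x)) nc g' k' r c
        (fun y hy hpy => hrR (congrArg Prod.fst hpy).symm)]
      rw [hg]
      have hiff : (r < R + 1) ↔ (r < R) := by omega
      simp only [hiff]
-- ===== decryption: filling column L[i] with t[k+i*nr ..] =====
theorem pvDecCell (t : List Char) (nr nc : Nat) :
    ∀ (L : List Nat) (g : List (List (List Char))) (k : Nat), L.Nodup → k ≤ t.length →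
    g.length = nr → (∀ r', r' < nr → (g.getD r' []).length = nc) → (∀ e ∈ L, e < nc) →
    (∀ r c, c ∉ L →
      pvCell (L.foldl (fun st e => (List.range nr).foldl (pvStep t (fun x => (x, e))) st) (g, k)).1 r c
        = pvCell g r c) ∧
    (∀ i r, (hi : i < L.length) → r < nr →
      pvCell (L.foldl (fun st e => (List.range nr).foldl (pvStep t (fun x => (x, e))) st) (g, k)).1 r L[i]
        = if k + i * nr + r < t.length then [t.getD (k + i * nr + r) ' '] else pvCell g r L[i]) := by
  intro L
  induction L with
  | nil => intro g k _ _ _ _ _; exact ⟨fun r c _ => rfl, fun i r hi _ => by simp at hi⟩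
  | cons e L ih =>
    intro g k hnd hk hglen hgrow hmem
    simp only [List.foldl_cons]
    rcases hst : (List.range nr).foldl (pvStep t (fun x => (x, e))) (g, k) with ⟨g1, k1⟩
    have hk1 : k1 = min (k + nr) t.length := by
      have := pvFill_counter t (fun x => (x, e)) nr g k hk
      rw [hst] at this; exact this
    have hg1len : g1.length = nr := by
      have := pvFill_length t (fun x => (x, e)) nr g k
      rw [hst] at this; simpa [hglen] using this
    have hg1row : ∀ r', r' < nr → (g1.getD r' []).length = nc := by
      intro r' hr'
      have := pvFill_getD_len t (fun x => (x, e)) nr g k r'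
      rw [hst] at this
      simp only at this
      rw [this]; exact hgrow r' hr'
    have hnd' : L.Nodup := hnd.of_cons
    have hene : e ∉ L := by simp at hnd; exact hnd.1
    obtain ⟨ihmiss, ihhit⟩ := ih g1 k1 hnd' (by omega) hg1len hg1row
      (fun x hx => hmem x (List.mem_cons_of_mem e hx))
    -- cells of the inner fold (column e)
    have hcol : ∀ r, r < nr → pvCell g1 r e =
        if k + r < t.length then [t.getD (k + r) ' '] else pvCell g r e := by
      intro r hrnr
      have h := pvFill_cell_hit t (fun x => (x, e)) nr g k r
        (fun a b hab => by simpa using congrArg Prod.fst hab) hrnr hk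
        (Nat.lt_of_lt_of_eq hrnr hglen.symm)
        (Nat.lt_of_lt_of_eq (hmem e (List.mem_cons_self)) (hgrow r hrnr).symm)
      simp only at h
      rw [hst] at h
      exact h
    have hothers : ∀ r c, c ≠ e → pvCell g1 r c = pvCell g r c := by
      intro r c hce
      have h := pvFill_cell_miss t (fun x => (x, e)) nr g k r c
        (fun y hy hpy => hce (congrArg Prod.snd hpy).symm)
      rw [hst] at h
      exact h
    constructor
    · intro r c hc
      rw [ihmiss r c (fun hmem' => hc (List.mem_cons_of_mem e hmem'))]
      exact hothers r c (fun hce => hc (hce ▸ List.mem_cons_self))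
    · intro i r hi hrnr
      match i with
      | 0 =>
        simp only [List.getElem_cons_zero]
        rw [ihmiss r e hene, hcol r hrnr]
        simp only [Nat.zero_mul, Nat.add_zero]
      | Nat.succ j =>
        have hj : j < L.length := by simpa using hi
        simp only [List.getElem_cons_succ]
        have hLj : L[j]'hj ∈ L := List.getElem_mem _
        have hLje : L[j]'hj ≠ e := fun hx => hene (hx ▸ hLj)
        rw [ihhit j r hj hrnr, hothers r (L[j]'hj) hLje]
        rcases Nat.lt_or_ge t.length (k + nr) with hlt | hle
        · rw [show k1 = t.length from by omega]
          rw [if_neg (by omega), if_neg (fun hcon => absurd hcon (by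
            rw [Nat.succ_mul]
            have : t.length ≤ k + (j * nr + nr) + r :=
              le_trans (Nat.le_of_lt hlt) (by omega)
            omega))]
        · rw [show k1 = k + nr from by omega, show k + nr + j * nr + r = k + (j + 1) * nr + r from by
            rw [Nat.succ_mul]; omega]
-- ===== ceiling arithmetic (math.ceil(a/b) = (a+b-1)/b) =====
theorem pvCeil_eq (a b : Nat) (hb : 0 < b) :
    -(PySem.Int.floordiv (-(a : Int)) (b : Int)) = ((a + b - 1) / b : Nat) := by
  rw [PySem.Int.neg_floordiv_neg_eq_iff_of_pos (by exact_mod_cast hb : (0:Int) < (b:Int))]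
  have h := Nat.div_add_mod (a + b - 1) b
  have hm : (a + b - 1) % b < b := Nat.mod_lt _ hb
  have hc1 : ((a + b - 1 : Nat) : Int) = (a : Int) + b - 1 := by omega
  have hcast : (b : Int) * ((a + b - 1) / b : Nat) + ((a + b - 1) % b : Nat) = (a : Int) + b - 1 := by
    rw [← hc1]; exact_mod_cast h
  have hm' : ((a + b - 1) % b : Nat) < (b : Int) := by exact_mod_cast hm
  have hm0 : (0:Int) ≤ ((a + b - 1) % b : Nat) := by positivity
  constructor <;> nlinarith [hcast, hm', hm0]

theorem pvLt_ceil (a b x : Nat) (hb : 0 < b) : x < (a + b - 1) / b ↔ x * b < a := by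
  rw [Nat.lt_iff_add_one_le, Nat.le_div_iff_mul_le hb]
  rw [Nat.succ_mul]
  generalize x * b = X
  omega

-- ===== small list helpers =====
theorem pvFlatMap_ite {α : Type} (l : List Nat) (p : Nat → Prop) [DecidablePred p] (f : Nat → α) :
    (l.flatMap fun x => if p x then [f x] else []) = (l.filter (fun x => decide (p x))).map f := by
  induction l with
  | nil => rfl
  | cons a l ih =>
    simp only [List.flatMap_cons, List.filter_cons]
    by_cases hp : p a <;> simp [hp, ih]

theorem pvRange_filter_lt (n K : Nat) :
    (List.range n).filter (fun r => decide (r < K)) = List.range (min n K) := by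
  induction n with
  | zero => rfl
  | succ n ih =>
    rw [List.range_succ, List.filter_append, ih]
    by_cases h : n < K
    · rw [show min (n + 1) K = n + 1 from by omega, show min n K = n from by omega,
        List.range_succ]
      simp [h]
    · rw [show min (n + 1) K = min n K from by omega]
      simp [h]

-- ===== B's cols array: each key-order position gets its slice =====
theorem pvColsB (F : Int → List Char) :
    ∀ (L : List Int) (j : Int) (cols : List (List Char)), L.Nodup → (∀ x ∈ L, 0 ≤ x) →
    (∀ c : Nat, (c : Int) ∉ L →
      ((PySem.List.enumerate L j).foldl (fun cols p => cols.set p.2.toNat (F p.1)) cols).getD c []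
        = cols.getD c []) ∧
    (∀ i, (hi : i < L.length) → (L[i]).toNat < cols.length →
      ((PySem.List.enumerate L j).foldl (fun cols p => cols.set p.2.toNat (F p.1)) cols).getD (L[i]).toNat []
        = F (j + i)) := by
  intro L
  induction L with
  | nil =>
    intro j cols _ _
    exact ⟨fun c _ => rfl, fun i hi => by simp at hi⟩
  | cons x L ih =>
    intro j cols hnd hpos
    rw [PySem.List.enumerate_cons]
    simp only [List.foldl_cons]
    have hx0 : 0 ≤ x := hpos x List.mem_cons_self
    have hxL : x ∉ L := by simp at hnd; exact hnd.1
    obtain ⟨ihmiss, ihhit⟩ := ih (j + 1) (cols.set x.toNat (F j)) hnd.of_cons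
      (fun y hy => hpos y (List.mem_cons_of_mem x hy))
    constructor
    · intro c hc
      rw [ihmiss c (fun hmem => hc (List.mem_cons_of_mem x hmem))]
      have hne : x.toNat ≠ c := by
        intro he
        exact hc (by rw [← he, Int.toNat_of_nonneg hx0]; exact List.mem_cons_self)
      simp [List.getD_eq_getElem?_getD, List.getElem?_set, hne]
    · intro i hi hlen
      match i with
      | 0 =>
        simp only [List.getElem_cons_zero]
        have hxnotL : (↑x.toNat : Int) ∉ L := by rwa [Int.toNat_of_nonneg hx0]
        rw [ihmiss x.toNat hxnotL]
        simp only [List.getElem_cons_zero] at hlen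
        simp [List.getD_eq_getElem?_getD, List.getElem?_set_self, hlen]
      | Nat.succ q =>
        have hq : q < L.length := by simpa using hi
        simp only [List.getElem_cons_succ] at hlen ⊢
        rw [ihhit q hq (by simpa using hlen)]
        congr 1
        push_cast
        ring
-- ===== the two table builds produce the same dicts =====
set_option maxHeartbeats 1000000 in
theorem pvBuild_poly (m : List Char) : (pvBuildA m).1 = pvPolyB m := by
  simp [pvBuildA, pvCoords, pvPolyB, pvPairsB, pvCoordsB, PySem.Dict.ofList,
    PySem.Dict.update, List.range_succ]

set_option maxHeartbeats 1000000 in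
theorem pvBuild_rev (m : List Char) : (pvBuildA m).2.1 = pvRevB m := by
  simp [pvBuildA, pvCoords, pvRevB, pvPairsB, pvCoordsB, PySem.Dict.ofList,
    PySem.Dict.update, List.range_succ]

-- keys of a dict built by inserting come from the inserted pairs
theorem pvContains_foldl {κ ν : Type} [BEq κ] [LawfulBEq κ]
    (ps : List (κ × ν)) (ch : κ) :
    ∀ (d : PySem.Dict κ ν),
      (ps.foldl (fun acc p => acc.insert p.1 p.2) d).contains ch = true →
      ch ∈ ps.map (·.1) ∨ d.contains ch = true := by
  induction ps with
  | nil => intro d h; exact Or.inr h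
  | cons p ps ih =>
    intro d h
    rcases ih (d.insert p.1 p.2) h with hmem | hcont
    · exact Or.inl (List.mem_cons_of_mem _ hmem)
    · rw [PySem.Dict.contains_insert] at hcont
      rcases Bool.or_eq_true_iff.mp hcont with he | hd
      · exact Or.inl (by simp [List.map_cons]; left; exact (eq_of_beq he))
      · exact Or.inr hd

theorem pvPolyB_contains (m : List Char) (hm : m.length = 36) (ch : Char)
    (h : (pvPolyB m).contains ch = true) :
    ∃ c ∈ m, PySem.Chars.upperChar c = ch := by
  unfold pvPolyB PySem.Dict.ofList PySem.Dict.update at h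
  rcases pvContains_foldl _ ch _ h with hmem | hemp
  · rw [List.map_map] at hmem
    simp only [List.mem_map, List.mem_range] at hmem
    obtain ⟨i, hi, hich⟩ := hmem
    refine ⟨m.getD i ' ', ?_, by simpa using hich⟩
    have : i < m.length := by omega
    rw [List.getD_eq_getElem?_getD, List.getElem?_eq_getElem this]
    exact List.getElem_mem _
  · simp [PySem.Dict.contains_empty] at hemp

-- ===== substitution loop = find-then-join =====
theorem pvSubst_eq (poly : PySem.Dict Char (List Char)) (l : List Char) :
    pvSubstA poly l =
      match l.find? (fun ch => !poly.contains ch) with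
      | some ch => .error (pvErrCharA ch)
      | none => .ok (l.flatMap (fun ch => poly.getD ch [])) := by
  induction l with
  | nil => rfl
  | cons ch rest ih =>
    rw [List.find?_cons]
    cases hc : poly.contains ch
    · simp [pvSubstA, hc]
    · simp only [pvSubstA, hc, Bool.not_true, if_true, if_false, Bool.false_eq_true]
      rw [ih]
      cases hf : rest.find? (fun ch => !poly.contains ch) <;>
        simp [hf, List.flatMap_cons]

-- ===== pair decoding loop = chunk-then-find-then-map =====
theorem pvDecode_eq (rev : PySem.Dict (List Char) Char) (l : List Char) :
    pvDecodeA rev l =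
      match (pvChunk2B l).find? (fun p => !rev.contains p) with
      | some p => .error (pvErrPairA p)
      | none => .ok ((pvChunk2B l).map (fun p => rev.getD p ' ')) := by
  induction l using pvChunk2B.induct with
  | case1 => rfl
  | case2 a =>
    simp only [pvChunk2B, pvDecodeA, List.find?_cons, List.find?_nil]
    cases hc : rev.contains [a] <;> simp [hc]
  | case3 a b rest ih =>
    simp only [pvChunk2B, pvDecodeA, List.find?_cons]
    cases hc : rev.contains [a, b]
    · simp [hc]
    · simp only [hc, Bool.not_true]
      rw [ih]
      cases hf : (pvChunk2B rest).find? (fun p => !rev.contains p) <;>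
        simp [hf, List.map_cons]
-- ===== key order facts =====
theorem pvKoN (keyL : List Char) :
    PySem.List.sorted (PySem.List.pyRange 0 (keyL.length : Int) 1)
        (fun i => PySem.List.pyGetD keyL i ' ') false =
      ((PySem.List.sorted (PySem.List.pyRange 0 (keyL.length : Int) 1)
        (fun i => PySem.List.pyGetD keyL i ' ') false).map Int.toNat).map (Nat.cast : Nat → Int) ∧
    ((PySem.List.sorted (PySem.List.pyRange 0 (keyL.length : Int) 1)
        (fun i => PySem.List.pyGetD keyL i ' ') false).map Int.toNat).Perm
      (List.range keyL.length) := by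
  have hmem : ∀ x ∈ PySem.List.sorted (PySem.List.pyRange 0 (keyL.length : Int) 1)
      (fun i => PySem.List.pyGetD keyL i ' ') false, 0 ≤ x ∧ x < (keyL.length : Int) := by
    intro x hx
    rw [PySem.List.mem_sorted] at hx
    exact (PySem.List.mem_pyRange_one).1 hx
  constructor
  · rw [List.map_map]
    conv_lhs => rw [← List.map_id (PySem.List.sorted _ _ _)]
    exact List.map_congr_left (fun x hx => by
      simp [Int.toNat_of_nonneg (hmem x hx).1])
  · have h1 := PySem.List.sorted_perm (PySem.List.pyRange 0 (keyL.length : Int) 1)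
      (fun i => PySem.List.pyGetD keyL i ' ') false
    have h2 := h1.map Int.toNat
    have h3 : (PySem.List.pyRange 0 (keyL.length : Int) 1).map Int.toNat =
        List.range keyL.length := by
      rw [PySem.List.pyRange_zero_natCast, List.map_map]
      first
      | simp [Function.comp_def]
      | exact (List.map_congr_left (fun x _ => by simp)).trans (List.map_id _)
    rwa [h3] at h2
-- congruence for flatMap
theorem pvFlatMap_congr {α β : Type} (l : List α) (f g : α → List β)
    (h : ∀ x ∈ l, f x = g x) : l.flatMap f = l.flatMap g := by
  rw [List.flatMap_def, List.flatMap_def]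
  exact congrArg List.flatten (List.map_congr_left h)

-- ===== encryption core: grid readout = strided reads =====
theorem pvEncColB (s : List Char) (nc colN : Nat) (hnc : 0 < nc) :
    (PySem.List.pyRange (colN : Int) (s.length : Int) (nc : Int)).map
        (fun i => PySem.List.pyGetD s i ' ')
      = (List.range ((s.length - colN + nc - 1) / nc)).map
        (fun k => s.getD (colN + nc * k) ' ') := by
  rw [PySem.List.pyRange_of_pos _ _ (by exact_mod_cast hnc : (0:Int) < (nc:Int))]
  rw [List.map_map]
  by_cases hcl : colN < s.length
  · rw [if_pos (by exact_mod_cast hcl)]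
    have hsub : ((s.length : Int) - colN + nc - 1) = ((s.length - colN + nc - 1 : Nat) : Int) := by
      omega
    rw [hsub]
    have hdiv : ((s.length - colN + nc - 1 : Nat) : Int) / (nc : Int) =
        (((s.length - colN + nc - 1) / nc : Nat) : Int) := by
      exact_mod_cast (Int.natCast_div _ _).symm
    rw [hdiv, Int.toNat_natCast]
    refine List.map_congr_left (fun k _ => ?_)
    have hidx : ((colN : Int) + nc * k) = ((colN + nc * k : Nat) : Int) := by push_cast; ring
    simp only [Function.comp_apply, hidx, PySem.List.pyGetD_natCast]
  · rw [if_neg (by exact_mod_cast hcl)]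
    have h0 : s.length - colN = 0 := by omega
    rw [h0, show (0 + nc - 1) / nc = 0 from Nat.div_eq_of_lt (by omega)]
    rfl

theorem pvEncCore (s : List Char) (nc : Nat) (hnc : 0 < nc) (koN : List Nat)
    (hmem : ∀ c ∈ koN, c < nc) :
    (koN.foldl (fun acc colN =>
        (List.range ((s.length + nc - 1) / nc)).foldl (fun acc r =>
          acc ++ pvCell (((List.range ((s.length + nc - 1) / nc)).foldl
            (fun st e => (List.range nc).foldl (pvStep s (fun x => (e, x))) st)
            (List.replicate ((s.length + nc - 1) / nc) (List.replicate nc ([] : List Char)), 0)).1)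
            r colN) acc) [])
    = (koN.map (Nat.cast : Nat → Int)).flatMap (fun col =>
        (PySem.List.pyRange col (s.length : Int) (nc : Int)).map
          (fun i => PySem.List.pyGetD s i ' ')) := by
  simp only [PySem.List.foldl_append_eq_flatMap, List.nil_append]
  rw [List.flatMap_map]
  refine pvFlatMap_congr _ _ _ (fun colN hcol => ?_)
  have hcolnc : colN < nc := hmem colN hcol
  rw [pvEncColB s nc colN hnc]
  have hcell : ∀ r ∈ List.range ((s.length + nc - 1) / nc),
      pvCell (((List.range ((s.length + nc - 1) / nc)).foldl
          (fun st e => (List.range nc).foldl (pvStep s (fun x => (e, x))) st)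
          (List.replicate ((s.length + nc - 1) / nc) (List.replicate nc ([] : List Char)), 0)).1)
          r colN
        = if r * nc + colN < s.length then [s.getD (r * nc + colN) ' '] else [] := by
    intro r hr
    rw [List.mem_range] at hr
    rw [pvEncCell s nc ((s.length + nc - 1) / nc) ((s.length + nc - 1) / nc) (le_refl _) r colN hr hcolnc]
    by_cases hx : r * nc + colN < s.length
    · rw [if_pos ⟨hr, hx⟩, if_pos hx]
    · rw [if_neg (fun hcon => hx hcon.2), if_neg hx]
  calc (List.range ((s.length + nc - 1) / nc)).flatMap (fun r =>
        pvCell (((List.range ((s.length + nc - 1) / nc)).foldl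
          (fun st e => (List.range nc).foldl (pvStep s (fun x => (e, x))) st)
          (List.replicate ((s.length + nc - 1) / nc) (List.replicate nc ([] : List Char)), 0)).1) r colN)
      = (List.range ((s.length + nc - 1) / nc)).flatMap (fun r =>
          if r * nc + colN < s.length then [s.getD (r * nc + colN) ' '] else []) := by
        exact pvFlatMap_congr _ _ _ hcell
    _ = ((List.range ((s.length + nc - 1) / nc)).filter
          (fun r => decide (r * nc + colN < s.length))).map (fun r => s.getD (r * nc + colN) ' ') :=
        pvFlatMap_ite _ _ _
    _ = ((List.range ((s.length + nc - 1) / nc)).filter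
          (fun r => decide (r < (s.length - colN + nc - 1) / nc))).map
            (fun r => s.getD (r * nc + colN) ' ') := by
        congr 1
        refine List.filter_congr (fun r _ => ?_)
        rw [decide_eq_decide, pvLt_ceil _ nc r hnc]
        generalize r * nc = X
        omega
    _ = (List.range (min ((s.length + nc - 1) / nc) ((s.length - colN + nc - 1) / nc))).map
          (fun r => s.getD (r * nc + colN) ' ') := by rw [pvRange_filter_lt]
    _ = (List.range ((s.length - colN + nc - 1) / nc)).map (fun r => s.getD (r * nc + colN) ' ') := by
        rw [Nat.min_eq_right (Nat.div_le_div_right (by omega))]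
    _ = (List.range ((s.length - colN + nc - 1) / nc)).map (fun k => s.getD (colN + nc * k) ' ') :=
        List.map_congr_left (fun k _ => by rw [show k * nc + colN = colN + nc * k from by ring])

-- ===== decryption core: grid row-major readout = slice-based readout =====
theorem pvDecCore (t : List Char) (nc : Nat) (hnc : 0 < nc) (koN : List Nat)
    (hnd : koN.Nodup) (hmem : ∀ c ∈ koN, c < nc) (hall : ∀ c, c < nc → c ∈ koN) :
    ((List.range ((t.length + nc - 1) / nc)).foldl (fun acc r =>
        (List.range nc).foldl (fun acc c =>
          acc ++ pvCell ((koN.foldl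
            (fun st e => (List.range ((t.length + nc - 1) / nc)).foldl (pvStep t (fun x => (x, e))) st)
            (List.replicate ((t.length + nc - 1) / nc) (List.replicate nc ([] : List Char)), 0)).1) r c)
          acc) [])
    = (List.range ((t.length + nc - 1) / nc)).flatMap (fun r =>
        (List.range nc).flatMap (fun c =>
          if r < (((PySem.List.enumerate (koN.map (Nat.cast : Nat → Int)) 0).foldl
              (fun cols p => cols.set p.2.toNat
                (PySem.List.slice t (some (p.1 * ((((t.length + nc - 1) / nc : Nat)) : Int)))
                  (some ((p.1 + 1) * ((((t.length + nc - 1) / nc : Nat)) : Int)))))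
              (List.replicate nc ([] : List Char))).getD c []).length
          then [(((PySem.List.enumerate (koN.map (Nat.cast : Nat → Int)) 0).foldl
              (fun cols p => cols.set p.2.toNat
                (PySem.List.slice t (some (p.1 * ((((t.length + nc - 1) / nc : Nat)) : Int)))
                  (some ((p.1 + 1) * ((((t.length + nc - 1) / nc : Nat)) : Int)))))
              (List.replicate nc ([] : List Char))).getD c []).getD r ' ']
          else [])) := by
  set nrN := (t.length + nc - 1) / nc with hnrN
  obtain ⟨cmiss, chit⟩ := pvColsB
    (fun i => PySem.List.slice t (some (i * (nrN : Int))) (some ((i + 1) * (nrN : Int))))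
    (koN.map (Nat.cast : Nat → Int)) 0 (List.replicate nc ([] : List Char))
    (hnd.map (fun a b h => by exact_mod_cast h))
    (fun x hx => by
      obtain ⟨y, _, rfl⟩ := List.mem_map.1 hx
      positivity)
  obtain ⟨dmiss, dhit⟩ := pvDecCell t nrN nc koN
    (List.replicate nrN (List.replicate nc ([] : List Char))) 0 hnd (Nat.zero_le _)
    (by simp) (fun r' hr' => by
      simp [List.getD_eq_getElem?_getD, List.getElem?_replicate, hr']) hmem
  simp only [PySem.List.foldl_append_eq_flatMap, List.nil_append]
  refine pvFlatMap_congr _ _ _ (fun r hr => ?_)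
  rw [List.mem_range] at hr
  refine pvFlatMap_congr _ _ _ (fun c hc => ?_)
  rw [List.mem_range] at hc
  have hcko : c ∈ koN := hall c hc
  have hi : koN.idxOf c < koN.length := List.idxOf_lt_length_of_mem hcko
  have hgetA := dhit (koN.idxOf c) r hi hr
  have heq : koN[koN.idxOf c] = c := List.getElem_idxOf hi
  rw [heq] at hgetA
  rw [hgetA]
  have hg0 : pvCell (List.replicate nrN (List.replicate nc ([] : List Char))) r c = [] := by
    simp [pvCell, List.getD_eq_getElem?_getD, List.getElem?_replicate, hr, hc]
  rw [hg0]
  -- the B side column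
  have hmapi : (koN.map (Nat.cast : Nat → Int))[koN.idxOf c]'(by simpa using hi) = (c : Int) := by
    rw [List.getElem_map]; rw [heq]
  have hcols := chit (koN.idxOf c) (by simpa using hi)
    (by rw [hmapi]; simpa using hc)
  rw [hmapi] at hcols
  simp only [Int.toNat_natCast] at hcols
  rw [hcols]
  simp only [zero_add, Nat.zero_add] at *
  have hslice : PySem.List.slice t (some ((koN.idxOf c : Int) * (nrN : Int)))
        (some (((koN.idxOf c : Int) + 1) * (nrN : Int)))
      = List.take nrN (List.drop (koN.idxOf c * nrN) t) := by
    have h1 : ((koN.idxOf c : Int) * nrN) = ((koN.idxOf c * nrN : Nat) : Int) := by push_cast; ring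
    have h2 : (((koN.idxOf c : Int) + 1) * nrN) = (((koN.idxOf c + 1) * nrN : Nat) : Int) := by
      push_cast; ring
    rw [h1, h2, PySem.List.slice_natCast]
    congr 1
    rw [Nat.succ_mul]
    omega
  rw [hslice]
  have hlen' : (List.take nrN (List.drop (koN.idxOf c * nrN) t)).length
      = min nrN (t.length - koN.idxOf c * nrN) := by
    simp [List.length_take, List.length_drop]
  have hiff : r < (List.take nrN (List.drop (koN.idxOf c * nrN) t)).length
      ↔ koN.idxOf c * nrN + r < t.length := by
    rw [hlen']
    constructor
    · intro h
      have h2 := (lt_min_iff.1 h).2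
      have := Nat.lt_sub_iff_add_lt.1 h2
      omega
    · intro h
      exact lt_min_iff.2 ⟨hr, Nat.lt_sub_iff_add_lt.2 (by omega)⟩
  by_cases hcond : koN.idxOf c * nrN + r < t.length
  · rw [if_pos hcond, if_pos (hiff.2 hcond)]
    have hrlen : r < (List.take nrN (List.drop (koN.idxOf c * nrN) t)).length := hiff.2 hcond
    rw [List.getD_eq_getElem _ _ hrlen]
    rw [List.getD_eq_getElem _ _ (by omega : koN.idxOf c * nrN + r < t.length)]
    congr 1
    rw [List.getElem_take, List.getElem_drop]
  · rw [if_neg hcond, if_neg (fun h => hcond (hiff.1 h))]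

-- ===== VERDICT (by name: the statement is the Claim_ definition above) =====
theorem adfgvx_cipher_spec : Claim_equal_adfgvx_cipher := by
  intro text key matrix decrypt hdom hpre
  unfold Spec_adfgvx_cipher
  by_cases hm : matrix.toList.length ≠ 36 ∨ (PySem.Set.ofList matrix.toList).length ≠ 36
  · simp only [adfgvx_cipher, adfgvx_cipher_alt]
    rw [if_pos hm, if_pos hm]
  · have hm1 : matrix.toList.length = 36 := by by_contra h; exact hm (Or.inl h)
    have hm2 : (PySem.Set.ofList matrix.toList).length = 36 := by by_contra h; exact hm (Or.inr h)
    cases decrypt with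
    | true =>
      have hnc : 0 < key.toList.length := by
        by_contra h
        have hkey : key = "" := by
          have hnil : key.toList = [] := by
            cases hl : key.toList with
            | nil => rfl
            | cons a l => rw [hl] at h; simp at h
          simpa using congrArg String.ofList hnil
        have := (hpre ⟨hm1, hm2, hkey⟩).1
        simp at this
      simp only [adfgvx_cipher, adfgvx_cipher_alt]
      rw [if_neg hm, if_neg hm]
      simp only [pvBuild_poly, pvBuild_rev, Bool.not_true, Bool.false_eq_true, if_false]
      obtain ⟨hko_cast, hko_perm⟩ := pvKoN key.toList
      rw [hko_cast]
      generalize hKN : (PySem.List.sorted (PySem.List.pyRange 0 ((key.toList.length : Int)) 1)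
        (fun i => PySem.List.pyGetD key.toList i ' ') false).map Int.toNat = koN at hko_perm ⊢
      have hnd : koN.Nodup := hko_perm.nodup_iff.2 (List.nodup_range)
      have hmem : ∀ c ∈ koN, c < key.toList.length := fun c hc =>
        List.mem_range.1 (hko_perm.mem_iff.1 hc)
      have hall : ∀ c, c < key.toList.length → c ∈ koN := fun c hc =>
        hko_perm.mem_iff.2 (List.mem_range.2 hc)
      rw [pvCeil_eq (pvPrepA text.toList).length key.toList.length hnc]
      simp only [Int.toNat_natCast]
      rw [PySem.List.pyRange_zero_natCast, PySem.List.pyRange_zero_natCast]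
      simp only [List.foldl_map, Int.toNat_natCast]
      rw [pvDecode_eq]
      rw [pvDecCore (pvPrepA text.toList) key.toList.length hnc koN hnd hmem hall]
      cases hf : ((pvChunk2B _).find? (fun p => !(pvRevB matrix.toList).contains p)) <;> simp [hf]
    | false =>
      simp only [adfgvx_cipher, adfgvx_cipher_alt]
      rw [if_neg hm, if_neg hm]
      simp only [pvBuild_poly, pvBuild_rev, Bool.not_false, if_true]
      rw [pvSubst_eq]
      cases hfind : (pvPrepA text.toList).find? (fun ch => !(pvPolyB matrix.toList).contains ch) with
      | some ch => rfl
      | none =>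
        have hnc : 0 < key.toList.length := by
          by_contra h
          have hkey : key = "" := by
            have hnil : key.toList = [] := by
              cases hl : key.toList with
              | nil => rfl
              | cons a l => rw [hl] at h; simp at h
            simpa using congrArg String.ofList hnil
          obtain ⟨-, ch, hch, hbad⟩ := hpre ⟨hm1, hm2, hkey⟩
          have hcont := List.find?_eq_none.1 hfind ch hch
          have hcont' : (pvPolyB matrix.toList).contains ch = true := by simpa using hcont
          obtain ⟨c, hcm, hcu⟩ := pvPolyB_contains matrix.toList hm1 ch hcont'
          exact hbad c hcm hcu
        dsimp only
        obtain ⟨hko_cast, hko_perm⟩ := pvKoN key.toList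
        rw [hko_cast]
        generalize hKN : (PySem.List.sorted (PySem.List.pyRange 0 ((key.toList.length : Int)) 1)
          (fun i => PySem.List.pyGetD key.toList i ' ') false).map Int.toNat = koN at hko_perm ⊢
        have hmem : ∀ c ∈ koN, c < key.toList.length := fun c hc =>
          List.mem_range.1 (hko_perm.mem_iff.1 hc)
        rw [pvCeil_eq ((pvPrepA text.toList).flatMap
          (fun ch => (pvPolyB matrix.toList).getD ch [])).length key.toList.length hnc]
        simp only [Int.toNat_natCast]
        rw [PySem.List.pyRange_zero_natCast, PySem.List.pyRange_zero_natCast]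
        simp only [List.foldl_map, Int.toNat_natCast]
        exact congrArg String.ofList (pvEncCore _ key.toList.length hnc koN hmem)
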